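-- pv_equiv track=rewrite | github.com/jinto-joseph/DSA_LAB | Pattern_checker.py | is_pattern_valid
-- ===== SOURCE A (Python) =====
-- def is_pattern_valid(expression):
--     stack = []
--     a_count = 0
--     b_count = 0
--     c_count = 0
--     state = 0  # 0: counting a's, 1: counting b's, 2: counting c's
--
--     for char in expression:
--         if state == 0:  # Counting a's
--             if char == 'a':
--                 a_count += 1
--                 stack.append(char)
--             elif char == 'b':
--                 if a_count == 0:
--                     return False
--                 state = 1
--                 b_count += 1
--                 stack.append(char)
--             else:
--                 return False
--         elif state == 1:  # Counting b's
--             if char == 'b':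
--                 b_count += 1
--                 stack.append(char)
--             elif char == 'c':
--                 if a_count == 0 and b_count < a_count:  # Pattern 1/2 check
--                     return False
--                 state = 2
--                 c_count += 1
--                 stack.append(char)
--             else:
--                 return False
--         else:  # Counting c's
--             if char == 'c':
--                 c_count += 1
--                 stack.append(char)
--             else:
--                 return False
--
--     # Validate patterns after scanning
--     if state == 2:  # Reached c's
--         # Pattern 1: N a's, N b's, any c's
--         if a_count == b_count:
--             return True
--         # Pattern 2: N a's, any b's, N c's
--         if a_count == c_count:
--             return True
--         # Pattern 3: Any a's, N b's, N c's
--         if b_count == c_count: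
--             return True
--     return False
-- ===== SOURCE B (Python) =====
-- def is_pattern_valid(expression):
--     # Run-length encode the string, then check shape ['a','b','c'] and that
--     # some pair of the three run lengths is equal.
--     runs = []
--     for ch in expression:
--         if runs and runs[-1][0] == ch:
--             runs[-1][1] += 1
--         else:
--             runs.append([ch, 1])
--     if [r[0] for r in runs] != ['a', 'b', 'c']:
--         return False
--     n, m, k = runs[0][1], runs[1][1], runs[2][1]
--     return n == m or n == k or m == k
-- ===== Notes on version B (the rewrite author's own statement) =====
-- stated objective: idiomatic
-- what changed: Replaced the per-character state machine with early returns by a run-length encoding of the string followed by a single shape check ([a,b,c] runs) and a pairwise-equality test on the three run lengths.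
import Mathlib
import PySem

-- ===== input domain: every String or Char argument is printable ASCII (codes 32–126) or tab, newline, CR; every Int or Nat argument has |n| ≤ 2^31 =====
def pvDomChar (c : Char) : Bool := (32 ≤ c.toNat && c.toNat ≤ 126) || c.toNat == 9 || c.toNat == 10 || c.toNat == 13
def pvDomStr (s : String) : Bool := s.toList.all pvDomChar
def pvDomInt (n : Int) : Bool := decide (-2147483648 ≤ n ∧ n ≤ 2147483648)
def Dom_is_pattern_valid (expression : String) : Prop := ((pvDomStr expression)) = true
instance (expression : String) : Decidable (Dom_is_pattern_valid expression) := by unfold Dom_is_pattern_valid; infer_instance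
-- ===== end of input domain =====

-- B replaces A's per-character state machine by run-length encoding plus a shape/count check (idiomatic; same O(n) cost).

-- ===== PORT A =====
-- A's loop: state ∈ {0,1,2}, counts a b c, the (result-irrelevant but carried) stack;
-- an early `return False` becomes `none`, falling off the loop returns the final state.
def aLoop : List Char → List Char → Nat → Nat → Nat → Nat →
    Option (List Char × Nat × Nat × Nat × Nat)
  | [], stack, st, a, b, c => some (stack, st, a, b, c)
  | ch :: rest, stack, st, a, b, c =>
    if st = 0 then
      if ch = 'a' then aLoop rest (stack ++ [ch]) 0 (a + 1) b c
      else if ch = 'b' then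
        if a = 0 then none
        else aLoop rest (stack ++ [ch]) 1 a (b + 1) c
      else none
    else if st = 1 then
      if ch = 'b' then aLoop rest (stack ++ [ch]) 1 a (b + 1) c
      else if ch = 'c' then
        if a = 0 ∧ b < a then none  -- A's "Pattern 1/2 check"
        else aLoop rest (stack ++ [ch]) 2 a b (c + 1)
      else none
    else
      if ch = 'c' then aLoop rest (stack ++ [ch]) st a b (c + 1) else none

def is_pattern_valid (expression : String) : Bool :=
  match aLoop expression.toList [] 0 0 0 0 with
  | none => false
  | some (_, st, a, b, c) =>
    if st = 2 then
      if a = b then true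
      else if a = c then true
      else if b = c then true
      else false
    else false

-- ===== PORT B =====
-- Source B appends to / increments the LAST run; the fold keeps the run list
-- reversed (head = last run) and reverses at the end.
def bStep (runs : List (Char × Nat)) (ch : Char) : List (Char × Nat) :=
  match runs with
  | (d, n) :: t => if d = ch then (d, n + 1) :: t else (ch, 1) :: (d, n) :: t
  | [] => [(ch, 1)]

def bRuns (l : List Char) : List (Char × Nat) := (l.foldl bStep []).reverse

-- Source B: shape check [r[0] for r in runs] == ['a','b','c'], then unpack the three lengths
def bCheck (rs : List (Char × Nat)) : Bool :=
  if rs.map Prod.fst = ['a', 'b', 'c'] then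
    match rs with
    | (_, n) :: (_, m) :: (_, k) :: _ => (n == m || n == k || m == k)
    | _ => false  -- unreachable: the shape check forces exactly three runs
  else false

def is_pattern_valid_alt (expression : String) : Bool :=
  bCheck (bRuns expression.toList)

-- ===== PRECONDITION & SPEC =====
def Spec_is_pattern_valid (expression : String) (out : Bool) : Prop := out = is_pattern_valid_alt expression
instance (expression : String) (out : Bool) : Decidable (Spec_is_pattern_valid expression out) := by unfold Spec_is_pattern_valid; infer_instance

-- ===== CLAIM (what is proved, stated in full; the proofs are below) =====
def Claim_equal_is_pattern_valid : Prop := ∀ (expression : String), Dom_is_pattern_valid expression → Spec_is_pattern_valid expression (is_pattern_valid expression)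

-- ===== LEMMAS AND PROOFS =====

-- run-length length / remainder of the leading run of `d`
def cw (d : Char) (l : List Char) : Nat := (l.takeWhile (· = d)).length
def dw (d : Char) (l : List Char) : List Char := l.dropWhile (· = d)

-- reference (structural) run-length encoder
def runsR : List Char → List (Char × Nat)
  | [] => []
  | x :: xs => (x, 1 + cw x xs) :: runsR (dw x xs)
  termination_by l => l.length
  decreasing_by
    simp only [dw]
    exact Nat.lt_succ_of_le (List.length_dropWhile_le _ _)

theorem runsR_nil : runsR [] = [] := by rw [runsR]

theorem runsR_cons (x : Char) (xs : List Char) :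
    runsR (x :: xs) = (x, 1 + cw x xs) :: runsR (dw x xs) := by rw [runsR]

-- final count check of A, as one boolean
def chk (a b c : Nat) : Bool :=
  if a = b then true else if a = c then true else if b = c then true else false

-- what A computes from state 1 / state 0 on the rest of the input
def tail1 (a b c : Nat) : List Char → Bool
  | [] => false
  | x :: r =>
    if x = 'c' then
      (if r.all (· = 'c') then chk a b (c + 1 + r.length) else false)
    else false

def tail0 (a b c : Nat) : List Char → Bool
  | [] => false
  | x :: r =>
    if x = 'b' then
      (if a = 0 then false else tail1 a (b + 1 + cw 'b' r) c (dw 'b' r))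
    else false

def post : Option (List Char × Nat × Nat × Nat × Nat) → Bool
  | none => false
  | some (_, st, a, b, c) =>
    if st = 2 then
      if a = b then true else if a = c then true else if b = c then true else false
    else false

theorem cw_cons_self (d : Char) (l : List Char) : cw d (d :: l) = 1 + cw d l := by
  simp [cw, Nat.add_comm]

theorem cw_cons_ne {x d : Char} (h : x ≠ d) (l : List Char) : cw d (x :: l) = 0 := by
  simp [cw, h]

theorem dw_cons_self (d : Char) (l : List Char) : dw d (d :: l) = dw d l := by
  simp [dw]

theorem dw_cons_ne {x d : Char} (h : x ≠ d) (l : List Char) : dw d (x :: l) = x :: l := by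
  simp [dw, h]

theorem dw_head_ne (d : Char) (l : List Char) {y : Char} {ys : List Char}
    (h : dw d l = y :: ys) : y ≠ d := by
  induction l with
  | nil => simp [dw] at h
  | cons x xs ih =>
    by_cases hx : x = d
    · subst hx; rw [dw_cons_self] at h; exact ih h
    · rw [dw_cons_ne hx] at h; cases h; exact hx

theorem all_iff_dw_nil (d : Char) (l : List Char) :
    l.all (· = d) = true ↔ dw d l = [] := by
  induction l with
  | nil => simp [dw]
  | cons x xs ih =>
    by_cases hx : x = d
    · subst hx; simp [dw_cons_self, ih]
    · simp [dw_cons_ne hx, hx]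

theorem cw_of_all {d : Char} {l : List Char} (h : l.all (· = d) = true) :
    cw d l = l.length := by
  induction l with
  | nil => simp [cw]
  | cons x xs ih =>
    simp only [List.all_cons, Bool.and_eq_true, decide_eq_true_eq] at h
    obtain ⟨hx, hxs⟩ := h
    subst hx
    simp [cw_cons_self, ih hxs, Nat.add_comm]

-- A's loop from state 2: everything must be 'c'
theorem aLoop_state2 (l : List Char) (stk : List Char) (a b c : Nat) :
    post (aLoop l stk 2 a b c)
      = if l.all (· = 'c') then chk a b (c + l.length) else false := by
  induction l generalizing stk c with
  | nil => simp [aLoop, post, chk]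
  | cons x xs ih =>
    by_cases hx : x = 'c'
    · subst hx
      have hstep : aLoop ('c' :: xs) stk 2 a b c = aLoop xs (stk ++ ['c']) 2 a b (c + 1) := by
        simp [aLoop]
      rw [hstep, ih]
      simp only [List.all_cons, decide_true, Bool.true_and, List.length_cons]
      rw [show c + 1 + xs.length = c + (xs.length + 1) by omega]
    · have hstep : aLoop (x :: xs) stk 2 a b c = none := by
        simp [aLoop, hx]
      rw [hstep]
      simp [post, hx]

-- A's loop from state 1: a run of 'b's, then 'c's only
theorem aLoop_state1 (l : List Char) (stk : List Char) (a b c : Nat) :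
    post (aLoop l stk 1 a b c) = tail1 a (b + cw 'b' l) c (dw 'b' l) := by
  induction l generalizing stk b with
  | nil => simp [aLoop, post, tail1, dw]
  | cons x xs ih =>
    by_cases hb : x = 'b'
    · subst hb
      have hstep : aLoop ('b' :: xs) stk 1 a b c = aLoop xs (stk ++ ['b']) 1 a (b + 1) c := by
        simp [aLoop]
      rw [hstep, ih, cw_cons_self, dw_cons_self]
      rw [show b + 1 + cw 'b' xs = b + (1 + cw 'b' xs) by omega]
    · rw [cw_cons_ne hb, dw_cons_ne hb, Nat.add_zero]
      by_cases hc : x = 'c'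
      · subst hc
        have hguard : ¬ (a = 0 ∧ b < a) := by omega
        have hstep : aLoop ('c' :: xs) stk 1 a b c = aLoop xs (stk ++ ['c']) 2 a b (c + 1) := by
          simp [aLoop, hguard]
        rw [hstep, aLoop_state2]
        simp [tail1]
      · have hstep : aLoop (x :: xs) stk 1 a b c = none := by
          simp [aLoop, hb, hc]
        rw [hstep]
        simp [post, tail1, hc]

-- A's loop from state 0: a run of 'a's, then the rest
theorem aLoop_state0 (l : List Char) (stk : List Char) (a b c : Nat) :
    post (aLoop l stk 0 a b c) = tail0 (a + cw 'a' l) b c (dw 'a' l) := by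
  induction l generalizing stk a with
  | nil => simp [aLoop, post, tail0, dw]
  | cons x xs ih =>
    by_cases ha : x = 'a'
    · subst ha
      have hstep : aLoop ('a' :: xs) stk 0 a b c = aLoop xs (stk ++ ['a']) 0 (a + 1) b c := by
        simp [aLoop]
      rw [hstep, ih, cw_cons_self, dw_cons_self]
      rw [show a + 1 + cw 'a' xs = a + (1 + cw 'a' xs) by omega]
    · rw [cw_cons_ne ha, dw_cons_ne ha, Nat.add_zero]
      by_cases hb : x = 'b'
      · subst hb
        by_cases h0 : a = 0
        · have hstep : aLoop ('b' :: xs) stk 0 a b c = none := by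
            simp [aLoop, h0]
          rw [hstep]
          simp [post, tail0, h0]
        · have hstep : aLoop ('b' :: xs) stk 0 a b c = aLoop xs (stk ++ ['b']) 1 a (b + 1) c := by
            simp [aLoop, h0]
          rw [hstep, aLoop_state1]
          simp [tail0, h0]
      · have hstep : aLoop (x :: xs) stk 0 a b c = none := by
          simp [aLoop, ha, hb]
        rw [hstep]
        simp [post, tail0, hb]

-- B's fold computes the structural encoder
theorem foldl_bStep_go (l : List Char) (d : Char) (n : Nat) (t : List (Char × Nat)) :
    List.foldl bStep ((d, n) :: t) l
      = (runsR (dw d l)).reverse ++ (d, n + cw d l) :: t := by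
  induction l generalizing d n t with
  | nil => simp [dw, cw, runsR_nil]
  | cons x xs ih =>
    by_cases hx : x = d
    · subst hx
      have hstep : bStep ((x, n) :: t) x = (x, n + 1) :: t := by simp [bStep]
      simp only [List.foldl_cons, hstep]
      rw [ih, cw_cons_self, dw_cons_self]
      rw [show n + 1 + cw x xs = n + (1 + cw x xs) by omega]
    · have hxd : d ≠ x := fun h => hx h.symm
      have hstep : bStep ((d, n) :: t) x = (x, 1) :: (d, n) :: t := by simp [bStep, hxd]
      simp only [List.foldl_cons, hstep]
      rw [ih, cw_cons_ne hx, dw_cons_ne hx, Nat.add_zero, runsR_cons]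
      simp

theorem bRuns_eq_runsR (l : List Char) : bRuns l = runsR l := by
  cases l with
  | nil => simp [bRuns, runsR_nil]
  | cons x xs =>
    have hstep : bStep [] x = [(x, 1)] := by simp [bStep]
    simp only [bRuns, List.foldl_cons, hstep]
    rw [foldl_bStep_go, runsR_cons]
    simp [Nat.add_comm]

theorem chk_eq_beq (a b c : Nat) : chk a b c = (a == b || a == c || b == c) := by
  unfold chk; split_ifs <;> simp_all

theorem runsR_nil_iff (l : List Char) : runsR l = [] ↔ l = [] := by
  cases l with
  | nil => simp [runsR_nil]
  | cons x xs => rw [runsR_cons]; simp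

-- B's check once the runs after the leading 'b'-run are known
theorem tail1_eq_bCheck (a m : Nat) (r2 : List Char) :
    tail1 a m 0 r2 = bCheck ((('a', a) : Char × Nat) :: ('b', m) :: runsR r2) := by
  cases r2 with
  | nil => simp [tail1, bCheck, runsR_nil]
  | cons z r2' =>
    rw [runsR_cons]
    by_cases hz : z = 'c'
    · subst hz
      simp only [tail1]
      by_cases hall : r2'.all (· = 'c') = true
      · rw [if_pos hall]
        have hdw : dw 'c' r2' = [] := (all_iff_dw_nil 'c' r2').mp hall
        rw [hdw, cw_of_all hall, runsR_nil, chk_eq_beq]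
        simp [bCheck, Nat.add_comm]
      · rw [if_neg hall]
        have hdw : dw 'c' r2' ≠ [] := fun h => hall ((all_iff_dw_nil 'c' r2').mpr h)
        have hne : runsR (dw 'c' r2') ≠ [] := fun h => hdw ((runsR_nil_iff _).mp h)
        cases hr : runsR (dw 'c' r2') with
        | nil => exact absurd hr hne
        | cons p rest => simp [bCheck]
    · simp [tail1, bCheck, hz]

-- the crux: A's continuation after the leading 'a'-run equals B's check of the runs
theorem tail_eq_bCheck (a : Nat) (ha : a ≠ 0) (r1 : List Char)
    (hhead : ∀ y ys, r1 = y :: ys → y ≠ 'a') :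
    tail0 a 0 0 r1 = bCheck ((('a', a) : Char × Nat) :: runsR r1) := by
  cases r1 with
  | nil => simp [tail0, bCheck, runsR_nil]
  | cons y r1' =>
    rw [runsR_cons]
    by_cases hb : y = 'b'
    · subst hb
      simp only [tail0, if_neg ha]
      rw [show (0 : Nat) + 1 + cw 'b' r1' = 1 + cw 'b' r1' by omega]
      exact tail1_eq_bCheck a (1 + cw 'b' r1') (dw 'b' r1')
    · simp [tail0, bCheck, hb]

theorem main_eq (l : List Char) :
    post (aLoop l [] 0 0 0 0) = bCheck (runsR l) := by
  rw [aLoop_state0]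
  cases l with
  | nil => simp [tail0, bCheck, runsR_nil, dw]
  | cons x xs =>
    by_cases ha : x = 'a'
    · subst ha
      rw [cw_cons_self, dw_cons_self, runsR_cons, Nat.zero_add]
      exact tail_eq_bCheck _ (by omega) _ (fun y ys h => dw_head_ne 'a' xs h)
    · rw [cw_cons_ne ha, dw_cons_ne ha, Nat.add_zero, runsR_cons]
      by_cases hb : x = 'b'
      · subst hb
        simp [tail0, bCheck]
      · simp [tail0, bCheck, ha, hb]

-- ===== VERDICT (by name: the statement is the Claim_ definition above) =====
theorem is_pattern_valid_spec : Claim_equal_is_pattern_valid := by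
  intro expression _
  unfold Spec_is_pattern_valid is_pattern_valid_alt
  rw [bRuns_eq_runsR, ← main_eq]
  unfold is_pattern_valid post
  rfl
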